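-- pv_equiv track=rewrite | github.com/IGVF-DACC/igvf-catalog | data/adapters/uniprot_protein_adapter.py | get_full_name
-- ===== SOURCE A (Python) =====
-- def get_full_name(description):
--     rec_name = None
--     description_list = description.split(';')
--     for item in description_list:
--         if item.startswith('RecName: Full=') or item.startswith('SubName: Full='):
--             rec_name = item[14:]
--             if ' {' in rec_name:
--                 rec_name = rec_name[0: rec_name.index(' {')]
--             break
--     return rec_name
-- ===== SOURCE B (Python) =====
-- def get_full_name(description):
--     rest = description
--     while True:
--         j = rest.find(';')
--         seg = rest if j == -1 else rest[:j]
--         if seg.startswith('RecName: Full=') or seg.startswith('SubName: Full='):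
--             name = seg[14:]
--             k = name.find(' {')
--             return name if k == -1 else name[:k]
--         if j == -1:
--             return None
--         rest = rest[j + 1:]
-- ===== Notes on version B (the rewrite author's own statement) =====
-- stated objective: alternative
-- what changed: B replaces A's build-a-list-via-split-then-scan-with-startswith by a single semicolon-find-driven loop that walks the string suffix by suffix, slicing out one segment at a time and never materialising the split list.
import Mathlib
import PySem

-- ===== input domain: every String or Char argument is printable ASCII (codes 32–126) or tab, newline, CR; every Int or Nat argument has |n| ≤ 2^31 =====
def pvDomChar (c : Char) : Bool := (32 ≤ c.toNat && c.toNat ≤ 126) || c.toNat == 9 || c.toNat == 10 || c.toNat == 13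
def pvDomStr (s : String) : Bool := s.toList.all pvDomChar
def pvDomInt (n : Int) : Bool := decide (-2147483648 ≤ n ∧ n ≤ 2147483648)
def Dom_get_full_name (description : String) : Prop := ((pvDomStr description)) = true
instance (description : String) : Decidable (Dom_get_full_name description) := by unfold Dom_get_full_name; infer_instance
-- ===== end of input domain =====

-- B replaces split-into-a-list-then-scan by a single semicolon-find-driven loop over the remaining
-- suffix (no intermediate list); objective: alternative/idiomatic, same asymptotic cost.

-- ===== PORT A =====
-- first-match scan over the list produced by split(';'), = A's for-loop with break
def get_full_name_scan : List (List Char) → Option (List Char)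
  | [] => none
  | item :: rest =>
    if PySem.Chars.startswith item "RecName: Full=".toList
        || PySem.Chars.startswith item "SubName: Full=".toList then
      let rec_name := PySem.Chars.slice item (some 14) none          -- item[14:]
      if PySem.Chars.isIn " {".toList rec_name then                  -- ' {' in rec_name
        some (PySem.Chars.slice rec_name (some 0)
                (some (PySem.Chars.find rec_name " {".toList)))      -- rec_name[0:rec_name.index(' {')]
      else some rec_name
    else get_full_name_scan rest

def get_full_name (description : String) : Option String :=
  let description_list := PySem.Chars.splitOn description.toList [';']   -- description.split(';')
  (get_full_name_scan description_list).map String.ofList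

-- ===== PORT B =====
-- needed by the loop's termination: a hit of find is inside the string
theorem pv_find_toNat_lt {s sub : List Char} (hne : sub ≠ [])
    (h : ¬ PySem.Chars.find s sub = -1) : (PySem.Chars.find s sub).toNat < s.length := by
  have h0 : 0 ≤ PySem.Chars.find s sub := by
    have := PySem.Chars.neg_one_le_find s sub
    omega
  have hsp := (PySem.Chars.find_spec (s := s) (sub := sub) h0).1
  have hd : s.drop (PySem.Chars.find s sub).toNat ≠ [] := by
    intro hnil
    rw [hnil] at hsp
    exact hne (List.prefix_nil.mp hsp)
  have := List.drop_eq_nil_iff.not.mp (by simpa using hd)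
  omega

def get_full_name_loop (rest : List Char) : Option (List Char) :=
  let j := PySem.Chars.find rest [';']                               -- rest.find(';')
  let seg := if j = -1 then rest else PySem.Chars.slice rest none (some j)
  if PySem.Chars.startswith seg "RecName: Full=".toList
      || PySem.Chars.startswith seg "SubName: Full=".toList then
    let name := PySem.Chars.slice seg (some 14) none                 -- seg[14:]
    let k := PySem.Chars.find name " {".toList                       -- name.find(' {')
    if k = -1 then some name else some (PySem.Chars.slice name none (some k))
  else if j = -1 then none
  else get_full_name_loop (PySem.Chars.slice rest (some (j + 1)) none)   -- rest[j+1:]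
termination_by rest.length
decreasing_by
  rename_i hj
  have hlt := pv_find_toNat_lt (s := rest) (sub := [';']) (by simp) hj
  have h0 : 0 ≤ PySem.Chars.find rest [';'] := by
    have := PySem.Chars.neg_one_le_find rest [';']
    omega
  have : PySem.Chars.slice rest (some (PySem.Chars.find rest [';'] + 1)) none
      = rest.drop (PySem.Chars.find rest [';'] + 1).toNat := by
    simp only [PySem.Chars.slice_eq_listSlice]
    exact PySem.List.slice_from rest (by omega)
  rw [this, List.length_drop]
  omega

def get_full_name_alt (description : String) : Option String :=
  (get_full_name_loop description.toList).map String.ofList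

-- ===== PRECONDITION & SPEC =====
def Spec_get_full_name (description : String) (out : Option String) : Prop := out = get_full_name_alt description
instance (description : String) (out : Option String) : Decidable (Spec_get_full_name description out) := by unfold Spec_get_full_name; infer_instance

-- ===== CLAIM (what is proved, stated in full; the proofs are below) =====
def Claim_equal_get_full_name : Prop := ∀ (description : String), Dom_get_full_name description → Spec_get_full_name description (get_full_name description)

-- ===== LEMMAS AND PROOFS =====

theorem find_go_shift (sub l) (k : Nat) :
    PySem.Chars.find.go sub l k =
      if PySem.Chars.find.go sub l 0 = -1 then -1 else PySem.Chars.find.go sub l 0 + k := by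
  induction l generalizing k with
  | nil => simp [PySem.Chars.find.go]; split <;> simp
  | cons c t ih =>
    rw [show PySem.Chars.find.go sub (c::t) k = if sub.isPrefixOf (c::t) = true then (k:Int) else PySem.Chars.find.go sub t (k+1) from by rw [PySem.Chars.find.go], show PySem.Chars.find.go sub (c::t) 0 = if sub.isPrefixOf (c::t) = true then ((0:Nat):Int) else PySem.Chars.find.go sub t (0+1) from by rw [PySem.Chars.find.go]]
    by_cases hp : sub.isPrefixOf (c :: t) = true
    · simp [hp]
    · simp only [hp, if_neg, Bool.not_eq_true] at *
      rw [ih (k+1), ih 1]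
      have hge : -1 ≤ PySem.Chars.find.go sub t 0 := by
        have := PySem.Chars.neg_one_le_find t sub
        simpa [PySem.Chars.find] using this
      split <;> split <;> omega

theorem find_cons (c : Char) (t : List Char) :
    PySem.Chars.find (c :: t) [';'] =
      if c = ';' then 0
      else if PySem.Chars.find t [';'] = -1 then -1 else PySem.Chars.find t [';'] + 1 := by
  rw [PySem.Chars.find, PySem.Chars.find.go]
  have hpre : [';'].isPrefixOf (c :: t) = (c = ';' : Bool) := by
    show ((';' == c) && List.isPrefixOf [] t) = _
    by_cases h : c = ';'
    · subst h; simp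
    · have h2 : (';' == c) = false := beq_eq_false_iff_ne.mpr (Ne.symm h)
      simp [h2, h]
  rw [hpre]
  by_cases hc : c = ';'
  · simp [hc]
  · simp only [hc, decide_false, Bool.false_eq_true, if_false]
    rw [find_go_shift]
    simp [PySem.Chars.find]

def pureSplit : List Char → List (List Char)
  | [] => [[]]
  | c :: rest =>
    if c = ';' then [] :: pureSplit rest
    else match pureSplit rest with
      | [] => [[c]]
      | h :: t => (c :: h) :: t

theorem pureSplit_ne_nil (s : List Char) : pureSplit s ≠ [] := by
  cases s with
  | nil => simp [pureSplit]
  | cons c rest =>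
    simp only [pureSplit]
    split
    · simp
    · split <;> simp

theorem splitOn_go_spec : ∀ (fuel : Nat) (l cur : List Char) (acc : List (List Char)),
    l.length < fuel →
    PySem.Chars.splitOn.go [';'] fuel l cur acc =
      acc.reverse ++ List.modifyHead (fun h => cur.reverse ++ h) (pureSplit l) := by
  intro fuel
  induction fuel with
  | zero => intro l cur acc h; omega
  | succ n ih =>
    intro l cur acc h
    cases l with
    | nil =>
      rw [PySem.Chars.splitOn.go]
      · simp [pureSplit]
      · omega
    | cons c rest =>
      rw [PySem.Chars.splitOn.go]
      have hpre : [';'].isPrefixOf (c :: rest) = (c = ';' : Bool) := by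
        show ((';' == c) && List.isPrefixOf [] rest) = _
        by_cases hc : c = ';'
        · subst hc; simp
        · have h2 : (';' == c) = false := beq_eq_false_iff_ne.mpr (Ne.symm hc)
          simp [h2, hc]
      rw [hpre]
      by_cases hc : c = ';'
      · subst hc
        simp only [decide_true, if_true, List.length_singleton, List.drop_succ_cons, List.drop_zero]
        rw [ih rest [] (cur.reverse :: acc) (by simp at h; omega)]
        simp [pureSplit]
        cases pureSplit rest <;> simp
      · simp only [hc, decide_false, Bool.false_eq_true, if_false]
        rw [ih rest (c :: cur) acc (by simp at h; omega)]
        simp only [pureSplit, hc, if_false]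
        rcases hps : pureSplit rest with _ | ⟨hd, tl⟩
        · exact absurd hps (pureSplit_ne_nil rest)
        · simp

theorem splitOn_eq_pureSplit (s : List Char) :
    PySem.Chars.splitOn s [';'] = pureSplit s := by
  rw [PySem.Chars.splitOn, splitOn_go_spec (s.length + 1) s [] [] (by omega)]
  rcases hps : pureSplit s with _ | ⟨hd, tl⟩
  · exact absurd hps (pureSplit_ne_nil s)
  · simp

theorem pureSplit_decomp (s : List Char) :
    (PySem.Chars.find s [';'] = -1 → pureSplit s = [s]) ∧
    (PySem.Chars.find s [';'] ≠ -1 →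
      pureSplit s = s.take (PySem.Chars.find s [';']).toNat
        :: pureSplit (s.drop ((PySem.Chars.find s [';']).toNat + 1))) := by
  induction s with
  | nil =>
    constructor
    · intro _; rfl
    · intro h; exact absurd (by rw [PySem.Chars.find, PySem.Chars.find.go]; rfl) h
  | cons c t ih =>
    rw [find_cons]
    by_cases hc : c = ';'
    · subst hc
      rw [if_pos rfl]
      constructor
      · intro h; exact absurd h (by decide)
      · intro _
        simp [pureSplit]
    · simp only [if_neg hc]
      by_cases hft : PySem.Chars.find t [';'] = -1
      · simp only [if_pos hft]
        constructor
        · intro _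
          have h1 := ih.1 hft
          simp [pureSplit, hc, h1]
        · intro h; omega
      · simp only [if_neg hft]
        have hge : 0 ≤ PySem.Chars.find t [';'] := by
          have := PySem.Chars.neg_one_le_find t [';']
          omega
        constructor
        · intro h; omega
        · intro _
          have h2 := ih.2 hft
          have htn : (PySem.Chars.find t [';'] + 1).toNat = (PySem.Chars.find t [';']).toNat + 1 := by omega
          rw [htn]
          simp only [pureSplit, if_neg hc, h2, List.take_succ_cons, List.drop_succ_cons]

theorem loop_eq_scan (rest : List Char) :
    get_full_name_loop rest = get_full_name_scan (pureSplit rest) := by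
  rw [get_full_name_loop]
  by_cases hj : PySem.Chars.find rest [';'] = -1
  · rw [(pureSplit_decomp rest).1 hj]
    by_cases hk : PySem.Chars.find (PySem.List.slice rest (some 14) none) " {".toList = -1 <;>
      simp [get_full_name_scan, hj, PySem.Chars.isIn, hk, PySem.List.slice_zero_start]
  · have hge : 0 ≤ PySem.Chars.find rest [';'] := by
      have := PySem.Chars.neg_one_le_find rest [';']
      omega
    have hseg : PySem.List.slice rest none (some (PySem.Chars.find rest [';']))
        = rest.take (PySem.Chars.find rest [';']).toNat := PySem.List.slice_to rest hge
    have hdrop : PySem.List.slice rest (some (PySem.Chars.find rest [';'] + 1)) none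
        = rest.drop ((PySem.Chars.find rest [';']).toNat + 1) := by
      rw [PySem.List.slice_from rest (by omega)]
      congr 1
      omega
    have hrec := loop_eq_scan (rest.drop ((PySem.Chars.find rest [';']).toNat + 1))
    rw [(pureSplit_decomp rest).2 hj]
    by_cases hk : PySem.Chars.find (PySem.List.slice (rest.take (PySem.Chars.find rest [';']).toNat) (some 14) none) " {".toList = -1 <;>
      simp [get_full_name_scan, hj, hseg, hdrop, PySem.Chars.isIn, hk,
        PySem.List.slice_zero_start, hrec]
  termination_by rest.length
  decreasing_by
    have := pv_find_toNat_lt (s := rest) (sub := [';']) (by simp) hj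
    simp only [List.length_drop]
    omega

-- ===== VERDICT (by name: the statement is the Claim_ definition above) =====
theorem get_full_name_spec : Claim_equal_get_full_name := by
  intro description _
  unfold Spec_get_full_name get_full_name get_full_name_alt
  rw [splitOn_eq_pureSplit, loop_eq_scan]
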